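-- pv_equiv track=rewrite | github.com/juan15377/TimeTables | src/models/database/models/Professor_Classroom_Group.py | decompose_vector
-- ===== SOURCE A (Python) =====
-- def decompose_vector(vector):
--     pos_in = 0
--     positions = []
--     start_sequence = False
--
--     for num, ele in enumerate(vector):
--         if ele == 0 and start_sequence:
--             start_sequence = False
--             positions.append((pos_in, num))
--             continue
--         if ele == 1 and (not start_sequence):
--             start_sequence = True
--             pos_in = num
--             continue
--     if start_sequence:
--         positions.append((pos_in, len(vector)-1))
--
--     return positions
-- ===== SOURCE B (Python) =====
-- def decompose_vector(vector):
--     # Alternating two-phase scan: skip to the next 1 (run start), then skip to the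
--     # next 0 (run end, exclusive index; a run still open at the end gets len-1).
--     n = len(vector)
--     positions = []
--     i = 0
--     while True:
--         # phase 1: find the next run start (the next 1)
--         while i < n and vector[i] != 1:
--             i += 1
--         if i == n:
--             return positions
--         start = i
--         i += 1
--         # phase 2: find the 0 that closes the run
--         while i < n and vector[i] != 0:
--             i += 1
--         if i == n:
--             positions.append((start, n - 1))
--             return positions
--         positions.append((start, i))
--         i += 1
-- ===== Notes on version B (the rewrite author's own statement) =====
-- stated objective: alternative
-- what changed: Replaced the flag-based state machine (boolean start_sequence toggled element by element) with an alternating two-phase scan that skips to the next 1 to open a run and then to the next 0 to close it, appending each (start,end) pair as a whole.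
import Mathlib
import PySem

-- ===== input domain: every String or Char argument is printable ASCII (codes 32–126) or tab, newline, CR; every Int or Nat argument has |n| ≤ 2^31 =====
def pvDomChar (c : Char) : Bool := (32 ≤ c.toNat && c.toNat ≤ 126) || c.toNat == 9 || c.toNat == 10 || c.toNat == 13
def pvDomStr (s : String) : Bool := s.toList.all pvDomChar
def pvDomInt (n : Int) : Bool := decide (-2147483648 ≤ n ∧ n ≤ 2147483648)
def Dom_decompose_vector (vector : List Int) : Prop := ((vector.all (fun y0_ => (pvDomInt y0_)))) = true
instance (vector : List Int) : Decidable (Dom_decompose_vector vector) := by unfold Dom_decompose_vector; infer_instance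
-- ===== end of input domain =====

-- B replaces A's boolean-flag state machine by an alternating two-phase scan (find next 1, then next 0); same values, no speed claim.

-- ===== PORT A =====
-- the for-loop of A as structural recursion over the suffix, carrying (num, pos_in, positions, start_sequence)
def pvLoopA (l : List Int) (num pos_in : Int) (positions : List (Int × Int))
    (start_sequence : Bool) : Int × List (Int × Int) × Bool :=
  match l with
  | [] => (pos_in, positions, start_sequence)
  | ele :: rest =>
    if ele = 0 ∧ start_sequence = true then
      pvLoopA rest (num + 1) pos_in (positions ++ [(pos_in, num)]) false
    else if ele = 1 ∧ start_sequence = false then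
      pvLoopA rest (num + 1) num positions true
    else
      pvLoopA rest (num + 1) pos_in positions start_sequence

def decompose_vector (vector : List Int) : List (Int × Int) :=
  let r := pvLoopA vector 0 0 [] false
  if r.2.2 then r.2.1 ++ [(r.1, (vector.length : Int) - 1)] else r.2.1

-- ===== PORT B =====
-- the two while-loop phases of B as a mutual recursion over the suffix (i = current index, n = len(vector))
mutual
  -- phase 1 of Source B: skip until the next 1 (run start)
  def pvSkip (n : Int) (l : List Int) (i : Int) : List (Int × Int) :=
    match l with
    | [] => []
    | x :: rest => if x ≠ 1 then pvSkip n rest (i + 1) else pvRun n i rest (i + 1)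
  -- phase 2 of Source B: scan until the 0 that closes the run started at `start`
  def pvRun (n : Int) (start : Int) (l : List Int) (i : Int) : List (Int × Int) :=
    match l with
    | [] => [(start, n - 1)]
    | x :: rest => if x ≠ 0 then pvRun n start rest (i + 1) else (start, i) :: pvSkip n rest (i + 1)
end

def decompose_vector_alt (vector : List Int) : List (Int × Int) :=
  pvSkip (vector.length : Int) vector 0

-- ===== PRECONDITION & SPEC =====
def Spec_decompose_vector (vector : List Int) (out : List (Int × Int)) : Prop := out = decompose_vector_alt vector
instance (vector : List Int) (out : List (Int × Int)) : Decidable (Spec_decompose_vector vector out) := by unfold Spec_decompose_vector; infer_instance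

-- ===== CLAIM (what is proved, stated in full; the proofs are below) =====
def Claim_equal_decompose_vector : Prop := ∀ (vector : List Int), Dom_decompose_vector vector → Spec_decompose_vector vector (decompose_vector vector)

-- ===== LEMMAS AND PROOFS =====

-- A's post-loop finish step, parametrised by the total length n
def pvFinishA (n : Int) (r : Int × List (Int × Int) × Bool) : List (Int × Int) :=
  if r.2.2 then r.2.1 ++ [(r.1, n - 1)] else r.2.1

theorem pvMain (l : List Int) : ∀ (num p : Int) (acc : List (Int × Int)),
    (pvFinishA (num + l.length) (pvLoopA l num p acc false) = acc ++ pvSkip (num + l.length) l num) ∧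
    (pvFinishA (num + l.length) (pvLoopA l num p acc true) = acc ++ pvRun (num + l.length) p l num) := by
  induction l with
  | nil =>
    intro num p acc
    simp [pvLoopA, pvSkip, pvRun, pvFinishA]
  | cons x rest ih =>
    intro num p acc
    rw [show (num + ((x :: rest).length : Int)) = (num + 1) + (rest.length : Int) by
      push_cast [List.length_cons]; ring]
    constructor
    · -- start_sequence = false
      by_cases hx1 : x = 1
      · simp only [pvLoopA, pvSkip, hx1]
        simpa using (ih (num + 1) num acc).2
      · simp only [pvLoopA, pvSkip]
        simpa [hx1] using (ih (num + 1) p acc).1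
    · -- start_sequence = true
      by_cases hx0 : x = 0
      · simp only [pvLoopA, pvRun, hx0]
        simpa using (ih (num + 1) p (acc ++ [(p, num)])).1
      · simp only [pvLoopA, pvRun]
        simpa [hx0] using (ih (num + 1) p acc).2
-- ===== VERDICT (by name: the statement is the Claim_ definition above) =====
theorem decompose_vector_spec : Claim_equal_decompose_vector := by
  intro vector _
  unfold Spec_decompose_vector decompose_vector decompose_vector_alt
  have h := (pvMain vector 0 0 []).1
  simpa [pvFinishA] using h
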